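-- pv_equiv track=rewrite | github.com/mitsuo0114/competitive_programming | python/atcoder/CODE FESTIVAL 2016/B.py | solve
-- ===== SOURCE A (Python) =====
-- def solve(N):
--     d = 10 ** 7
--     index = d // 2
--     while True:
--         k1 = index * (index - 1) // 2
--         k2 = index * (index + 1) // 2
--         if k1 < N <= k2:
--             break
--         elif k1 <= N:
--             index = (index + d) // 2
--         else:
--             d = index
--             index = index // 2
--
--     d = k2 - N
--     return "\n".join([str(i) for i in range(1, index + 1) if i != d])
-- ===== SOURCE B (Python) =====
-- def solve(N):
--     # Accumulate triangular sums from zero instead of binary-searching for the index.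
--     index = 0
--     total = 0
--     while total < N:
--         index += 1
--         total += index
--     d = total - N
--     return "\n".join([str(i) for i in range(1, index + 1) if i != d])
-- ===== Notes on version B (the rewrite author's own statement) =====
-- stated objective: simpler
-- what changed: Replaces the ad-hoc from-above binary search over (d,index) by a single forward scan that accumulates triangular sums from zero until they reach N; the output join is unchanged.
-- outside the precondition, e.g. on solve(0): A does not finish within the time limit, B returns ''
import Mathlib
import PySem

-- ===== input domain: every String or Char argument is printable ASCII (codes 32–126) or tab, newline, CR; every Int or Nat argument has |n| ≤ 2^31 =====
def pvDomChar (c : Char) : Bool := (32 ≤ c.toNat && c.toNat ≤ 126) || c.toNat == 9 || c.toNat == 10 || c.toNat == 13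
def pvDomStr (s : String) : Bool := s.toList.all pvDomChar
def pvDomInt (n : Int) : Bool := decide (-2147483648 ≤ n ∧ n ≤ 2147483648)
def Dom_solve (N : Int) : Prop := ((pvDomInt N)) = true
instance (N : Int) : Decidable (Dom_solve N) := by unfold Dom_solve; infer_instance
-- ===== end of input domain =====

-- B changes the index search only (an accumulating scan instead of A's binary search); objective: simpler.

-- ===== PORT A =====
-- "\n".join([str(i) for i in range(1, index+1) if i != d])  (this output pass is identical in A and B)
def renderOut (index d : Int) : String :=
  PySem.Str.join "\n" (((PySem.List.pyRange 1 (index + 1) 1).filter (fun i => decide (i ≠ d))).map PySem.Int.toStr)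

-- A's `while True` binary search, step for step; the fuel only makes it total (Python's loop
-- diverges for N ≤ 0; on 1 ≤ N ≤ tri(10^7-1) the fuel is proved sufficient below the claim).
def solveLoopA (N : Int) (fuel : Nat) (d index : Int) : Option (Int × Int) :=
  match fuel with
  | 0 => none
  | fuel + 1 =>
    let k1 := PySem.Int.floordiv (index * (index - 1)) 2
    let k2 := PySem.Int.floordiv (index * (index + 1)) 2
    if k1 < N ∧ N ≤ k2 then some (index, k2)
    else if k1 ≤ N then solveLoopA N fuel d (PySem.Int.floordiv (index + d) 2)
    else solveLoopA N fuel index (PySem.Int.floordiv index 2)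

def solve (N : Int) : String :=
  match solveLoopA N 300000000 10000000 5000000 with
  | some (index, k2) => renderOut index (k2 - N)
  | none => ""   -- never reached under Pre_solve (fuel sufficiency is proved below)

-- ===== PORT B =====
-- B's accumulating scan: while total < N: index += 1; total += index.  The fuel only makes it
-- total; N+1 steps always suffice (each step raises total by at least 1), proved below.
def solveLoopB (N : Int) (fuel : Nat) (index total : Int) : Option (Int × Int) :=
  match fuel with
  | 0 => none
  | fuel + 1 =>
    if total < N then solveLoopB N fuel (index + 1) (total + (index + 1))
    else some (index, total)

def solve_alt (N : Int) : String :=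
  match solveLoopB N (N.toNat + 1) 0 0 with
  | some (index, total) => renderOut index (total - N)
  | none => ""   -- never reached (proved below)

-- ===== PRECONDITION & SPEC =====
-- Pre_ excludes N ≤ 0, on which A's while-loop never reaches its break condition and diverges
-- (returns nothing); B returns "" there.
def Pre_solve (N : Int) : Prop := 1 ≤ N
instance (N : Int) : Decidable (Pre_solve N) := by unfold Pre_solve; infer_instance
def pvWitness_solve : Int := (7)
def Spec_solve (N : Int) (out : String) : Prop := out = solve_alt N
instance (N : Int) (out : String) : Decidable (Spec_solve N out) := by unfold Spec_solve; infer_instance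

-- ===== CLAIM (what is proved, stated in full; the proofs are below) =====
def Claim_equal_solve : Prop := ∀ (N : Int), Dom_solve N → Pre_solve N → Spec_solve N (solve N)

-- ===== LEMMAS AND PROOFS =====

-- tri m = m*(m+1)//2, the triangular number; the common language of both loop analyses
def tri (m : Int) : Int := PySem.Int.floordiv (m * (m + 1)) 2

theorem tri_twice (m : Int) : 2 * tri m = m * (m + 1) := by
  have h : (2 : Int) ∣ m * (m + 1) := (Int.even_mul_succ_self m).two_dvd
  unfold tri
  rw [PySem.Int.floordiv_eq_ediv_of_pos (by omega)]
  exact Int.mul_ediv_cancel' h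

theorem k1_eq_tri (index : Int) :
    PySem.Int.floordiv (index * (index - 1)) 2 = tri (index - 1) := by
  unfold tri; congr 1; ring

-- the invariant of A's loop states; Python's loop terminates exactly from these
def InvA (N d index : Int) : Prop :=
  1 ≤ N ∧ d ≤ 10000000 ∧ N ≤ tri (d - 1) ∧ 0 ≤ index ∧ index < d ∧
    (index = d - 1 → tri (index - 1) ≠ N)

theorem postA_break (N d index : Int) (h : InvA N d index)
    (hbr : PySem.Int.floordiv (index * (index - 1)) 2 < N ∧
           N ≤ PySem.Int.floordiv (index * (index + 1)) 2) :
    0 ≤ index ∧ tri (index - 1) < N ∧ N ≤ tri index ∧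
      PySem.Int.floordiv (index * (index + 1)) 2 = tri index := by
  have e1 := k1_eq_tri index
  exact ⟨h.2.2.2.1, by omega, hbr.2, rfl⟩

theorem invA_up (N d index : Int) (h : InvA N d index)
    (hbr : ¬ (PySem.Int.floordiv (index * (index - 1)) 2 < N ∧
              N ≤ PySem.Int.floordiv (index * (index + 1)) 2))
    (_hup : PySem.Int.floordiv (index * (index - 1)) 2 ≤ N) :
    InvA N d (PySem.Int.floordiv (index + d) 2) := by
  obtain ⟨h1, hd, h2, h3, h4, h5⟩ := h
  have hb := PySem.Int.floordiv_two_mid_bounds (lo := index) (hi := d) (le_of_lt h4)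
  have hle : PySem.Int.floordiv (index + d) 2 ≤ PySem.Int.floordiv (d - 1 + d) 2 := by
    rw [PySem.Int.floordiv_eq_ediv_of_pos (by omega), PySem.Int.floordiv_eq_ediv_of_pos (by omega)]
    exact Int.ediv_le_ediv (by omega) (by omega)
  have hd1 : PySem.Int.floordiv (d - 1 + d) 2 = d - 1 := by
    rw [PySem.Int.floordiv_eq_iff_of_pos (by omega)]; omega
  refine ⟨h1, hd, h2, by omega, by omega, ?_⟩
  intro heq
  rw [heq]
  rw [PySem.Int.floordiv_eq_iff_of_pos (by omega)] at heq
  -- new index is d-1, so the old index was d-2 or d-1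
  rcases (by omega : index = d - 2 ∨ index = d - 1) with hc | hc
  · -- old index = d-2: tri (d-2) = N would have satisfied the break condition
    intro hNe
    apply hbr
    have e1 := k1_eq_tri index
    have e2 : PySem.Int.floordiv (index * (index + 1)) 2 = tri index := rfl
    have hx : d - 1 - 1 = index := by omega
    rw [hx] at hNe
    have t0 := tri_twice (index - 1)
    have t2 := tri_twice index
    rcases (by omega : index = 0 ∨ 1 ≤ index) with hz | hpos
    · -- index = 0 gives N = tri 0 = 0, against 1 ≤ N
      exfalso; rw [hz] at hNe t2; norm_num at t2; omega
    · exact ⟨by nlinarith [e1, t0, t2, hNe, hpos], by omega⟩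
  · have hx : d - 1 - 1 = index - 1 := by omega
    rw [hx]
    exact h5 hc

theorem invA_down (N d index : Int) (h : InvA N d index)
    (hdn : ¬ PySem.Int.floordiv (index * (index - 1)) 2 ≤ N) :
    InvA N index (PySem.Int.floordiv index 2) := by
  obtain ⟨h1, hd, h2, h3, h4, h5⟩ := h
  have e1 := k1_eq_tri index
  have hpos : 1 ≤ index := by
    by_contra hlt
    have hz : index = 0 := by omega
    subst hz
    apply hdn
    have hz2 : PySem.Int.floordiv ((0 : Int) * (0 - 1)) 2 = 0 := by decide
    omega
  have h0 : 0 ≤ PySem.Int.floordiv index 2 := by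
    rw [PySem.Int.floordiv_eq_ediv_of_pos (by omega)]
    exact Int.ediv_nonneg h3 (by omega)
  have hle : PySem.Int.floordiv index 2 ≤ PySem.Int.floordiv (2 * index - 1) 2 := by
    rw [PySem.Int.floordiv_eq_ediv_of_pos (by omega), PySem.Int.floordiv_eq_ediv_of_pos (by omega)]
    exact Int.ediv_le_ediv (by omega) (by omega)
  have h21 : PySem.Int.floordiv (2 * index - 1) 2 = index - 1 := by
    rw [PySem.Int.floordiv_eq_iff_of_pos (by omega)]; omega
  refine ⟨h1, by omega, by omega, h0, by omega, ?_⟩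
  -- index//2 = index-1 forces index ≤ 2, but then k1 = tri(index-1) ≤ 1 ≤ N, against k1 > N
  intro heq
  exfalso
  rw [PySem.Int.floordiv_eq_iff_of_pos (by omega)] at heq
  have t0 := tri_twice (index - 1)
  nlinarith [t0, h1, h3, e1]

theorem upA_strict (N d index : Int) (h : InvA N d index)
    (hbr : ¬ (PySem.Int.floordiv (index * (index - 1)) 2 < N ∧
              N ≤ PySem.Int.floordiv (index * (index + 1)) 2))
    (_hup : PySem.Int.floordiv (index * (index - 1)) 2 ≤ N) :
    index < PySem.Int.floordiv (index + d) 2 := by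
  obtain ⟨h1, hd, h2, h3, h4, h5⟩ := h
  have hb := PySem.Int.floordiv_two_mid_bounds (lo := index) (hi := d) (le_of_lt h4)
  rcases lt_or_eq_of_le hb.1 with hx | hx
  · exact hx
  · -- a stalled midpoint means d = index+1; then the invariant and hup force the break
    exfalso
    have heq : PySem.Int.floordiv (index + d) 2 = index := hx.symm
    rw [PySem.Int.floordiv_eq_iff_of_pos (by omega)] at heq
    have hdi : d = index + 1 := by omega
    have e1 := k1_eq_tri index
    have e2 : PySem.Int.floordiv (index * (index + 1)) 2 = tri index := rfl
    have hne : tri (index - 1) ≠ N := h5 (by omega)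
    have hx2 : d - 1 = index := by omega
    rw [hx2] at h2
    exact hbr ⟨by omega, by omega⟩

-- the termination measure of A's loop: d dominates, the bit-length of the gap breaks up-runs
def muA (d index : Int) : Nat := 25 * d.toNat + Nat.size ((d - index).toNat - 1)

theorem size_half_lt (n : Nat) (h : 1 ≤ n) : Nat.size (n / 2) < Nat.size n := by
  have hs : 1 ≤ Nat.size n := by
    rcases Nat.eq_zero_or_pos (Nat.size n) with hz | hp
    · exact absurd (Nat.size_eq_zero.mp hz) (by omega)
    · exact hp
  have hn : n < 2 ^ Nat.size n := Nat.lt_size_self n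
  have hpow : 2 ^ (Nat.size n - 1) * 2 = 2 ^ Nat.size n := by
    rw [← pow_succ]; congr 1; omega
  have : n / 2 < 2 ^ (Nat.size n - 1) := by omega
  have := Nat.size_le.mpr this
  omega

theorem muA_up (N d index : Int) (h : InvA N d index)
    (hbr : ¬ (PySem.Int.floordiv (index * (index - 1)) 2 < N ∧
              N ≤ PySem.Int.floordiv (index * (index + 1)) 2))
    (hup : PySem.Int.floordiv (index * (index - 1)) 2 ≤ N) :
    muA d (PySem.Int.floordiv (index + d) 2) < muA d index := by
  have hst := upA_strict N d index h hbr hup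
  obtain ⟨h1, hd, h2, h3, h4, h5⟩ := h
  have hup' := invA_up N d index ⟨h1, hd, h2, h3, h4, h5⟩ hbr hup
  have hlt : PySem.Int.floordiv (index + d) 2 < d := hup'.2.2.2.2.1
  set m := PySem.Int.floordiv (index + d) 2 with hm
  have hmb : 2 * m ≤ index + d ∧ index + d < 2 * m + 2 := by
    have := (PySem.Int.floordiv_eq_iff_of_pos (a := index + d) (b := 2) (q := m) (by omega)).mpr
    constructor
    · have h' := (PySem.Int.floordiv_eq_iff_of_pos (a := index + d) (b := 2) (q := m) (by omega)).mp hm.symm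
      omega
    · have h' := (PySem.Int.floordiv_eq_iff_of_pos (a := index + d) (b := 2) (q := m) (by omega)).mp hm.symm
      omega
  unfold muA
  have hgap : ((d - m).toNat - 1) = ((d - index).toNat - 1) / 2 := by omega
  have hge1 : 1 ≤ (d - index).toNat - 1 := by omega
  rw [hgap]
  have := size_half_lt ((d - index).toNat - 1) hge1
  omega

theorem muA_down (N d index : Int) (h : InvA N d index)
    (hdn : ¬ PySem.Int.floordiv (index * (index - 1)) 2 ≤ N) :
    muA index (PySem.Int.floordiv index 2) < muA d index := by
  have hdn' := invA_down N d index h hdn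
  obtain ⟨h1, hd, h2, h3, h4, h5⟩ := h
  have h0 : 0 ≤ PySem.Int.floordiv index 2 := hdn'.2.2.2.1
  have hlt : PySem.Int.floordiv index 2 < index := hdn'.2.2.2.2.1
  unfold muA
  have hsz : Nat.size ((index - PySem.Int.floordiv index 2).toNat - 1) ≤ 24 := by
    apply Nat.size_le.mpr
    have : (index - PySem.Int.floordiv index 2).toNat - 1 < 10000000 := by omega
    omega
  omega

-- fuel sufficiency + postcondition for A's loop, by induction on the fuel
theorem A_loop_total (N : Int) : ∀ (f : Nat) (d index : Int), InvA N d index → muA d index < f →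
    ∃ i k, solveLoopA N f d index = some (i, k) ∧
      (0 ≤ i ∧ tri (i - 1) < N ∧ N ≤ tri i ∧ k = tri i) := by
  intro f
  induction f with
  | zero => intro d index _ hmu; omega
  | succ f ih =>
    intro d index hInv hmu
    simp only [solveLoopA]
    split_ifs with hbr hup
    · exact ⟨index, _, rfl, postA_break N d index hInv hbr⟩
    · exact ih d (PySem.Int.floordiv (index + d) 2) (invA_up N d index hInv hbr hup)
        (by have := muA_up N d index hInv hbr hup; omega)
    · exact ih index (PySem.Int.floordiv index 2) (invA_down N d index hInv hup)
        (by have := muA_down N d index hInv hup; omega)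

theorem invA_init (N : Int) (hg : 1 ≤ N ∧ N ≤ tri (10000000 - 1)) : InvA N 10000000 5000000 :=
  ⟨hg.1, by omega, hg.2, by omega, by omega, fun heq => absurd heq (by omega)⟩

-- fuel sufficiency + postcondition for B's scan: each step raises total by ≥ 1
theorem B_loop_total (N : Int) : ∀ (f : Nat) (index total : Int),
    0 ≤ index → total = tri index → (1 ≤ N → tri (index - 1) < N) → (N - total).toNat < f →
    ∃ i t, solveLoopB N f index total = some (i, t) ∧
      (0 ≤ i ∧ t = tri i ∧ N ≤ tri i ∧ (1 ≤ N → tri (i - 1) < N)) := by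
  intro f
  induction f with
  | zero => intro index total _ _ _ hf; omega
  | succ f ih =>
    intro index total h1 h2 h3 hf
    simp only [solveLoopB]
    split_ifs with hlt
    · have t0 := tri_twice index
      have t1 := tri_twice (index + 1)
      have hs : tri (index + 1) = tri index + (index + 1) := by nlinarith [t0, t1]
      refine ih (index + 1) (total + (index + 1)) (by omega) (by omega) ?_ (by omega)
      intro _
      have hx : tri (index + 1 - 1) = tri index := by ring_nf
      omega
    · exact ⟨index, total, rfl, h1, h2, by omega, h3⟩

-- the index with tri(index-1) < N ≤ tri(index) is unique
theorem tri_index_unique (N a b : Int) (ha0 : 0 ≤ a) (hb0 : 0 ≤ b)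
    (ha1 : tri (a - 1) < N) (ha2 : N ≤ tri a) (hb1 : tri (b - 1) < N) (hb2 : N ≤ tri b) : a = b := by
  have ta := tri_twice a
  have tb := tri_twice b
  have ta1 := tri_twice (a - 1)
  have tb1 := tri_twice (b - 1)
  by_contra hne
  rcases (by omega : a < b ∨ b < a) with h | h
  · nlinarith
  · nlinarith

theorem solve_eq_of_pre (N : Int) (hd : Dom_solve N) (hp : Pre_solve N) : solve N = solve_alt N := by
  have h1 : 1 ≤ N := hp
  have hdom : -2147483648 ≤ N ∧ N ≤ 2147483648 := by
    have := hd; unfold Dom_solve pvDomInt at this; simpa using this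
  have htri : tri (10000000 - 1) = 49999995000000 := by
    have := tri_twice ((10000000 : Int) - 1); omega
  have hmu : muA 10000000 5000000 < 300000000 := by
    unfold muA
    have : Nat.size ((10000000 - 5000000 : Int).toNat - 1) ≤ 24 := by
      apply Nat.size_le.mpr
      decide
    omega
  obtain ⟨ia, ka, heqA, hA0, hA1, hA2, hA3⟩ :=
    A_loop_total N 300000000 10000000 5000000 (invA_init N ⟨h1, by omega⟩) hmu
  obtain ⟨ib, tb, heqB, hB0, hB3, hB2, hB1⟩ :=
    B_loop_total N (N.toNat + 1) 0 0 (by omega)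
      (by have := tri_twice (0 : Int)
          have hz : (0 : Int) * (0 + 1) = 0 := by norm_num
          omega)
      (fun hN => by
          have := tri_twice ((0 : Int) - 1)
          have hz : ((0 : Int) - 1) * (0 - 1 + 1) = 0 := by norm_num
          omega)
      (by omega)
  unfold solve solve_alt
  rw [heqA, heqB]
  have hi : ia = ib := tri_index_unique N ia ib hA0 hB0 hA1 hA2 (hB1 h1) hB2
  subst hi
  have hk : ka = tb := by omega
  rw [hk]

-- ===== VERDICT (by name: the statement is the Claim_ definition above) =====
theorem solve_spec : Claim_equal_solve := by
  intro N hd hp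
  unfold Spec_solve
  exact solve_eq_of_pre N hd hp
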